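-- pv_equiv track=rewrite | github.com/GLCN1234/KEDM | kedm_calculator/backend/kedm_engine.py | order_rows
-- ===== SOURCE A (Python) =====
-- def order_rows(A, b, elim_col):
--     """Interleave rows so no consecutive pair is both zero at elim_col."""
--     m = len(b)
--     nonzero = [r for r in range(m) if A[r][elim_col] != 0]
--     zeros   = [r for r in range(m) if A[r][elim_col] == 0]
--     ordered = []
--     nz, z = 0, 0
--     for _ in range(m):
--         if nz < len(nonzero):
--             ordered.append(nonzero[nz]); nz += 1
--         elif z < len(zeros):
--             ordered.append(zeros[z]);   z  += 1
--     return [A[r] for r in ordered], [b[r] for r in ordered]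
-- ===== SOURCE B (Python) =====
-- def order_rows(A, b, elim_col):
--     """Stable sort of row indices keyed on the zero test (False < True)."""
--     ordered = sorted(range(len(b)), key=lambda r: A[r][elim_col] == 0)
--     return [A[r] for r in ordered], [b[r] for r in ordered]
-- ===== Notes on version B (the rewrite author's own statement) =====
-- stated objective: idiomatic
-- what changed: Replaced the two filter passes plus the explicit counter-driven drain loop with a single stable sort of the row indices keyed on the boolean zero test, which puts nonzero-at-column rows first while stability preserves the original order within each group.
import Mathlib
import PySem

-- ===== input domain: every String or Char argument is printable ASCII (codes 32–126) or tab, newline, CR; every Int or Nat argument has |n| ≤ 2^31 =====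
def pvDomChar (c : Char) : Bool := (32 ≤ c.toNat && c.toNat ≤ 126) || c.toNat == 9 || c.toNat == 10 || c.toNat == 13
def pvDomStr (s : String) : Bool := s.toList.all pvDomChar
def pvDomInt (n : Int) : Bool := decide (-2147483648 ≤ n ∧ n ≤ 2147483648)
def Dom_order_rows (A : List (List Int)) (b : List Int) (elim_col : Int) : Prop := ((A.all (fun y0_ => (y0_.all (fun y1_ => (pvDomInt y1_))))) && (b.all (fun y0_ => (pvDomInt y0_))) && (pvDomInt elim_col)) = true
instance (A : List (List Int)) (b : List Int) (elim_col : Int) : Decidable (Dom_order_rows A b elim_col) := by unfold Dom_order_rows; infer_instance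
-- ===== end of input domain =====

-- B replaces the partition-and-drain with one stable sort of the indices keyed on the zero test (idiomatic, same result).

-- ===== PORT A =====
def order_rows (A : List (List Int)) (b : List Int) (elim_col : Int) : List (List Int) × List Int :=
  let m : Int := b.length
  let nonzero : List Int := (PySem.List.pyRange 0 m 1).filter
    (fun r => PySem.List.pyGetD (PySem.List.pyGetD A r []) elim_col 0 != 0)
  let zeros : List Int := (PySem.List.pyRange 0 m 1).filter
    (fun r => PySem.List.pyGetD (PySem.List.pyGetD A r []) elim_col 0 == 0)
  let ordered : List Int := ((PySem.List.pyRange 0 m 1).foldl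
    (fun (st : List Int × Nat × Nat) _ =>
      if st.2.1 < nonzero.length then (st.1 ++ [nonzero.getD st.2.1 0], st.2.1 + 1, st.2.2)
      else if st.2.2 < zeros.length then (st.1 ++ [zeros.getD st.2.2 0], st.2.1, st.2.2 + 1)
      else st)
    ([], 0, 0)).1
  (ordered.map (fun r => PySem.List.pyGetD A r []), ordered.map (fun r => PySem.List.pyGetD b r 0))

-- ===== PORT B =====
def order_rows_alt (A : List (List Int)) (b : List Int) (elim_col : Int) : List (List Int) × List Int :=
  let ordered : List Int := PySem.List.sorted (PySem.List.pyRange 0 (b.length : Int) 1)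
    (fun r => PySem.List.pyGetD (PySem.List.pyGetD A r []) elim_col 0 == 0) false
  (ordered.map (fun r => PySem.List.pyGetD A r []), ordered.map (fun r => PySem.List.pyGetD b r 0))

-- ===== PRECONDITION & SPEC =====
-- Pre_ excludes exactly the inputs where Python A raises an IndexError: len(b) > len(A),
-- or elim_col out of range (Python negative-index rule) for some row A[r], r < len(b).
def Pre_order_rows (A : List (List Int)) (b : List Int) (elim_col : Int) : Prop :=
  b.length ≤ A.length ∧ ∀ row ∈ A.take b.length, PySem.Raise.InRange row.length elim_col
instance (A : List (List Int)) (b : List Int) (elim_col : Int) : Decidable (Pre_order_rows A b elim_col) := by unfold Pre_order_rows; infer_instance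
def pvWitness_order_rows : List (List Int) × List Int × Int := ([[1], [0], [3]], [5, 6], 0)

def Spec_order_rows (A : List (List Int)) (b : List Int) (elim_col : Int) (out : List (List Int) × List Int) : Prop := out = order_rows_alt A b elim_col
instance (A : List (List Int)) (b : List Int) (elim_col : Int) (out : List (List Int) × List Int) : Decidable (Spec_order_rows A b elim_col out) := by unfold Spec_order_rows; infer_instance

-- ===== CLAIM (what is proved, stated in full; the proofs are below) =====
def Claim_equal_order_rows : Prop := ∀ (A : List (List Int)) (b : List Int) (elim_col : Int), Dom_order_rows A b elim_col → Pre_order_rows A b elim_col → Spec_order_rows A b elim_col (order_rows A b elim_col)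

-- ===== LEMMAS AND PROOFS =====

-- insertBy appends when x precedes nothing in l
theorem insertBy_append_of_all_false {α : Type} (before : α → α → Bool) (x : α) (l : List α)
    (h : ∀ y ∈ l, before x y = false) :
    PySem.List.insertBy before x l = l ++ [x] := by
  induction l with
  | nil => rfl
  | cons y ys ih =>
    simp [PySem.List.insertBy, h y (by simp)]
    exact ih (fun z hz => h z (by simp [hz]))

-- insertBy passes over a prefix it precedes nothing of
theorem insertBy_append_left {α : Type} (before : α → α → Bool) (x : α) (F T : List α)
    (h : ∀ y ∈ F, before x y = false) :
    PySem.List.insertBy before x (F ++ T) = F ++ PySem.List.insertBy before x T := by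
  induction F with
  | nil => rfl
  | cons y ys ih =>
    simp [PySem.List.insertBy, h y (by simp)]
    exact ih (fun z hz => h z (by simp [hz]))

-- a stable sort by a boolean key is exactly "false-group then true-group", input order kept
theorem sorted_bool_partition {α : Type} (xs : List α) (key : α → Bool) :
    PySem.List.sorted xs key false = xs.filter (fun x => !(key x)) ++ xs.filter key := by
  rw [PySem.List.sorted_eq_foldl_insertBy]
  induction xs using List.reverseRecOn with
  | nil => rfl
  | append_singleton ys x ih =>
    rw [List.foldl_append, List.foldl_cons, List.foldl_nil, ih, List.filter_append,
      List.filter_append]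
    cases hx : key x with
    | true =>
      rw [insertBy_append_of_all_false]
      · simp [hx]
      · intro y _; simp [hx]
    | false =>
      rw [insertBy_append_left]
      · cases hT : ys.filter key with
        | nil => simp [hx, PySem.List.insertBy]
        | cons t ts =>
          have ht : key t = true := by
            have := List.of_mem_filter (l := ys) (p := key) (a := t) (by rw [hT]; simp)
            simpa using this
          simp [hx, PySem.List.insertBy, ht]
      · intro y hy
        have hy' : key y = false := by
          have := List.of_mem_filter (l := ys) (p := fun x => !(key x)) (a := y) hy
          simpa using this
        simp [hx, hy']

-- the counter-driven drain loop emits xs' remainder then ys' remainder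
theorem drain_eq (xs ys : List Int) (l : List Int) :
    ∀ (acc : List Int) (nz z : Nat), nz ≤ xs.length → z ≤ ys.length →
    l.length = (xs.length - nz) + (ys.length - z) →
    (l.foldl
      (fun (st : List Int × Nat × Nat) _ =>
        if st.2.1 < xs.length then (st.1 ++ [xs.getD st.2.1 0], st.2.1 + 1, st.2.2)
        else if st.2.2 < ys.length then (st.1 ++ [ys.getD st.2.2 0], st.2.1, st.2.2 + 1)
        else st)
      (acc, nz, z)).1 = acc ++ xs.drop nz ++ ys.drop z := by
  induction l with
  | nil =>
    intro acc nz z hnz hz hlen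
    have h1 : nz = xs.length := by simp at hlen; omega
    have h2 : z = ys.length := by simp at hlen; omega
    simp [h1, h2]
  | cons a t ih =>
    intro acc nz z hnz hz hlen
    by_cases h1 : nz < xs.length
    · rw [List.foldl_cons]
      simp only [h1, if_true]
      rw [ih (acc ++ [xs.getD nz 0]) (nz + 1) z (by omega) hz (by simp at hlen ⊢; omega)]
      rw [List.drop_eq_getElem_cons h1, List.getD_eq_getElem xs 0 h1]
      simp
    · by_cases h2 : z < ys.length
      · rw [List.foldl_cons]
        simp only [h1, if_false, h2, if_true]
        rw [ih (acc ++ [ys.getD z 0]) nz (z + 1) hnz (by omega) (by simp at hlen ⊢; omega)]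
        have hnz' : nz = xs.length := by omega
        rw [List.drop_eq_getElem_cons h2, List.getD_eq_getElem ys 0 h2]
        simp [hnz']
      · exfalso; simp at hlen; omega

-- ===== VERDICT (by name: the statement is the Claim_ definition above) =====
theorem order_rows_spec : Claim_equal_order_rows := by
  intro A b elim_col _ _
  unfold Spec_order_rows order_rows order_rows_alt
  simp only []
  set key : Int → Bool := fun r => PySem.List.pyGetD (PySem.List.pyGetD A r []) elim_col 0 == 0 with hkey
  set rng : List Int := PySem.List.pyRange 0 (b.length : Int) 1 with hrng
  have hpart : PySem.List.sorted rng key false = rng.filter (fun x => !(key x)) ++ rng.filter key :=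
    sorted_bool_partition rng key
  have hlen : rng.length = (rng.filter (fun x => !(key x))).length + (rng.filter key).length := by
    have := PySem.List.length_sorted (xs := rng) (key := key) (rev := false)
    rw [hpart] at this
    simpa using this.symm
  have hbne : (fun r => PySem.List.pyGetD (PySem.List.pyGetD A r []) elim_col 0 != 0)
      = (fun x => !(key x)) := by
    funext r; simp [hkey, bne]
  rw [hbne]
  have hdrain := drain_eq (rng.filter (fun x => !(key x))) (rng.filter key) rng [] 0 0
    (by omega) (by omega) (by simpa using hlen)
  simp only [List.drop_zero, List.nil_append] at hdrain
  rw [hdrain, hpart]
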